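-- pv_equiv track=rewrite | github.com/tgn203/lift-project | Untitled9.py | pathing
-- ===== SOURCE A (Python) =====
-- def pathing(currentFloor, queuedFloors): # compares the longest distance the elevator has to travel up, and the longest distance down, and chooses the shorter distance to travel in
--     checkUp = False
--     checkDown = False
--     for i in queuedFloors: # this makes sure the elevator can go up and/or down
--         if i > currentFloor:
--             checkUp = True
--         elif i < currentFloor:
--             checkDown = True
--     if checkUp == False and checkDown == False:
--         return "stop"
--     elif checkUp == False:
--         return "down"
--     elif checkDown == False:
--         return "up"
--
--     finalUp = 0
--     finalDown = 0
--     for i in queuedFloors: # compares the distances until it finds the furthest distance up and down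
--         distance = i - currentFloor
--         if distance > finalUp:
--             finalUp = distance
--         elif distance < finalDown:
--             finalDown = distance
--     finalDown = finalDown*-1 # makes the downward distance positive for comparison
--     if finalUp < finalDown: # the shorter distance is chosen
--         return "up"
--     else:
--         return "down"
-- ===== SOURCE B (Python) =====
-- def pathing(currentFloor, queuedFloors):
--     # sort the queue once; the extreme floors are the endpoints of the sorted list
--     s = sorted(queuedFloors)
--     if not s:
--         return "stop"
--     lowest, highest = s[0], s[-1]
--     if highest <= currentFloor and lowest >= currentFloor:
--         return "stop"
--     if highest <= currentFloor:
--         return "down"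
--     if lowest >= currentFloor:
--         return "up"
--     return "up" if highest - currentFloor < currentFloor - lowest else "down"
-- ===== Notes on version B (the rewrite author's own statement) =====
-- stated objective: alternative
-- what changed: Replaces A's two linear scans (direction flags, then furthest signed distances) by sorting the queue once and deciding everything from the sorted list's two endpoints (lowest and highest floor).
import Mathlib
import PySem

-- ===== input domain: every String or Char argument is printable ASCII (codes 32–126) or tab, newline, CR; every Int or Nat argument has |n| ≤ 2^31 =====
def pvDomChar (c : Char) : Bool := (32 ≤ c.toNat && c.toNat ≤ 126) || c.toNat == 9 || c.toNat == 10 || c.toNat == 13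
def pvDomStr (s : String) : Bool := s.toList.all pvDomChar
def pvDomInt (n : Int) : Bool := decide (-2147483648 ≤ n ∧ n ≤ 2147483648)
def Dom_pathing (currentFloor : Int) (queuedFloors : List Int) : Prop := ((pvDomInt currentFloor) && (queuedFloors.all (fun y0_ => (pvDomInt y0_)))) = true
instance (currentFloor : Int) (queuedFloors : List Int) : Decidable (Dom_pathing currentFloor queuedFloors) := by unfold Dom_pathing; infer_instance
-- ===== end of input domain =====

-- B replaces A's two linear scans by sorting the queue once and deciding from the sorted
-- list's endpoints (lowest/highest floor); objective: alternative (not faster).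

-- ===== PORT A =====
def pathing (currentFloor : Int) (queuedFloors : List Int) : String :=
  -- first loop: checkUp / checkDown flags
  let s := queuedFloors.foldl
    (fun (s : Bool × Bool) i =>
      if i > currentFloor then (true, s.2)
      else if i < currentFloor then (s.1, true)
      else s) (false, false)
  if s.1 = false ∧ s.2 = false then "stop"
  else if s.1 = false then "down"
  else if s.2 = false then "up"
  else
    -- second loop: furthest distance up (finalUp) and down (finalDown, negative)
    let t := queuedFloors.foldl
      (fun (t : Int × Int) i =>
        let distance := i - currentFloor
        if distance > t.1 then (distance, t.2)
        else if distance < t.2 then (t.1, distance)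
        else t) (0, 0)
    let finalDown := t.2 * (-1)
    if t.1 < finalDown then "up" else "down"

-- ===== PORT B =====
def pathing_alt (currentFloor : Int) (queuedFloors : List Int) : String :=
  -- s = sorted(queuedFloors); empty → "stop"; else lowest = s[0], highest = s[-1]
  match PySem.List.sorted queuedFloors (fun x => x) false with
  | [] => "stop"
  | x :: rest =>
    let lowest := x
    let highest := rest.getLastD x
    if highest ≤ currentFloor ∧ lowest ≥ currentFloor then "stop"
    else if highest ≤ currentFloor then "down"
    else if lowest ≥ currentFloor then "up"
    else if highest - currentFloor < currentFloor - lowest then "up" else "down"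

-- ===== PRECONDITION & SPEC =====
def Spec_pathing (currentFloor : Int) (queuedFloors : List Int) (out : String) : Prop := out = pathing_alt currentFloor queuedFloors
instance (currentFloor : Int) (queuedFloors : List Int) (out : String) : Decidable (Spec_pathing currentFloor queuedFloors out) := by unfold Spec_pathing; infer_instance

-- ===== CLAIM (what is proved, stated in full; the proofs are below) =====
def Claim_equal_pathing : Prop := ∀ (currentFloor : Int) (queuedFloors : List Int), Dom_pathing currentFloor queuedFloors → Spec_pathing currentFloor queuedFloors (pathing currentFloor queuedFloors)

-- ===== LEMMAS AND PROOFS =====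

-- A's first loop computes the two "any floor above / below" flags.
lemma afold1 (c : Int) (t : List Int) : ∀ (a b : Bool),
    t.foldl
      (fun (s : Bool × Bool) i =>
        if i > c then (true, s.2)
        else if i < c then (s.1, true)
        else s) (a, b)
    = (a || t.any (fun i => decide (i > c)), b || t.any (fun i => decide (i < c))) := by
  induction t with
  | nil => intro a b; simp
  | cons x t ih =>
    intro a b
    simp only [List.foldl_cons, List.any_cons]
    by_cases h1 : x > c
    · have hx : ¬ x < c := by omega
      rw [if_pos h1, ih]
      simp [h1, hx]
    · by_cases h2 : x < c
      · rw [if_neg h1, if_pos h2, ih]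
        simp [h1, h2]
      · rw [if_neg h1, if_neg h2, ih]
        simp [h1, h2]

-- A's second loop, with 0 ≤ fu and fd ≤ 0, computes running max/min of signed distances.
lemma afold2 (c : Int) (t : List Int) : ∀ (fu fd : Int), 0 ≤ fu → fd ≤ 0 →
    t.foldl
      (fun (t : Int × Int) i =>
        let distance := i - c
        if distance > t.1 then (distance, t.2)
        else if distance < t.2 then (t.1, distance)
        else t) (fu, fd)
    = (t.foldl (fun a i => max a (i - c)) fu, t.foldl (fun a i => min a (i - c)) fd) := by
  induction t with
  | nil => intro fu fd _ _; rfl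
  | cons x t ih =>
    intro fu fd hfu hfd
    simp only [List.foldl_cons]
    split_ifs with h1 h2
    · rw [ih (x - c) fd (by omega) hfd]
      simp only [Prod.mk.injEq]
      constructor <;> congr 1 <;> omega
    · rw [ih fu (x - c) hfu (by omega)]
      simp only [Prod.mk.injEq]
      constructor <;> congr 1 <;> omega
    · rw [ih fu fd hfu hfd]
      simp only [Prod.mk.injEq]
      constructor <;> congr 1 <;> omega

lemma foldl_max_max (t : List Int) : ∀ (x y : Int), t.foldl max (max x y) = max x (t.foldl max y) := by
  induction t with
  | nil => intro x y; rfl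
  | cons z t ih =>
    intro x y
    simp only [List.foldl_cons]
    rw [max_assoc, ih]

lemma foldl_min_min (t : List Int) : ∀ (x y : Int), t.foldl min (min x y) = min x (t.foldl min y) := by
  induction t with
  | nil => intro x y; rfl
  | cons z t ih =>
    intro z t_ih
    simp only [List.foldl_cons]
    rw [min_assoc, ih]

lemma foldl_shift_max (c : Int) (t : List Int) : ∀ (x fu : Int),
    (x :: t).foldl (fun a i => max a (i - c)) fu = max fu (t.foldl max x - c) := by
  induction t with
  | nil => intro x fu; rfl
  | cons y t ih =>
    intro x fu
    have := ih y (max fu (x - c))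
    simp only [List.foldl_cons] at this ⊢
    rw [this, foldl_max_max]
    omega

lemma foldl_shift_min (c : Int) (t : List Int) : ∀ (x fd : Int),
    (x :: t).foldl (fun a i => min a (i - c)) fd = min fd (t.foldl min x - c) := by
  induction t with
  | nil => intro x fd; rfl
  | cons y t ih =>
    intro x fd
    have := ih y (min fd (x - c))
    simp only [List.foldl_cons] at this ⊢
    rw [this, foldl_min_min]
    omega

-- the running fold max/min is an element and a bound
lemma foldl_max_mem (t : List Int) : ∀ x : Int, t.foldl max x ∈ x :: t := by
  induction t with
  | nil => intro x; simp
  | cons y t ih =>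
    intro x
    simp only [List.foldl_cons]
    rcases List.mem_cons.1 (ih (max x y)) with h | h
    · rw [h]; rcases max_choice x y with h' | h' <;> simp [h']
    · simp [h]

lemma foldl_min_mem (t : List Int) : ∀ x : Int, t.foldl min x ∈ x :: t := by
  induction t with
  | nil => intro x; simp
  | cons y t ih =>
    intro x
    simp only [List.foldl_cons]
    rcases List.mem_cons.1 (ih (min x y)) with h | h
    · rw [h]; rcases min_choice x y with h' | h' <;> simp [h']
    · simp [h]

lemma le_foldl_max (t : List Int) : ∀ (x y : Int), y ∈ x :: t → y ≤ t.foldl max x := by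
  induction t with
  | nil => intro x y hy; simp_all
  | cons z t ih =>
    intro x y hy
    simp only [List.foldl_cons]
    have hb := ih (max x z) (max x z) (by simp)
    rcases List.mem_cons.1 hy with h | h
    · rw [h]; exact le_trans (le_max_left x z) hb
    · rcases List.mem_cons.1 h with h' | h'
      · rw [h']; exact le_trans (le_max_right x z) hb
      · exact ih (max x z) y (List.mem_cons_of_mem _ h')

lemma foldl_min_le (t : List Int) : ∀ (x y : Int), y ∈ x :: t → t.foldl min x ≤ y := by
  induction t with
  | nil => intro x y hy; simp_all
  | cons z t ih =>
    intro x y hy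
    simp only [List.foldl_cons]
    have hb := ih (min x z) (min x z) (by simp)
    rcases List.mem_cons.1 hy with h | h
    · rw [h]; exact le_trans hb (min_le_left x z)
    · rcases List.mem_cons.1 h with h' | h'
      · rw [h']; exact le_trans hb (min_le_right x z)
      · exact ih (min x z) y (List.mem_cons_of_mem _ h')

-- the last element of a ≤-sorted list is an upper bound; it is a member
lemma getLastD_mem (rest : List Int) : ∀ x : Int, rest.getLastD x ∈ x :: rest := by
  induction rest with
  | nil => intro x; simp
  | cons y rest ih =>
    intro x
    rw [List.getLastD_cons]
    rcases List.mem_cons.1 (ih y) with h | h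
    · rw [h]; simp
    · exact List.mem_cons_of_mem _ (List.mem_cons_of_mem _ h)

lemma le_getLastD_of_pairwise (rest : List Int) : ∀ x y : Int,
    (x :: rest).Pairwise (fun a b => a ≤ b) → y ∈ x :: rest → y ≤ rest.getLastD x := by
  induction rest with
  | nil => intro x y _ hy; simp_all
  | cons z rest ih =>
    intro x y hp hy
    simp only [List.getLastD_cons]
    rcases List.mem_cons.1 hy with h | h
    · subst h
      have hxz : y ≤ z := (List.pairwise_cons.1 hp).1 z (by simp)
      have := ih z z (List.pairwise_cons.1 hp).2 (by simp)
      omega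
    · exact ih z y (List.pairwise_cons.1 hp).2 h

-- ===== VERDICT (by name: the statement is the Claim_ definition above) =====
theorem pathing_spec : Claim_equal_pathing := by
  intro c q _
  unfold Spec_pathing pathing pathing_alt
  cases q with
  | nil => rfl
  | cons x0 t0 =>
    rw [afold1 c (x0 :: t0) false false]
    rcases hs : PySem.List.sorted (x0 :: t0) (fun x => x) false with _ | ⟨x, rest⟩
    · exact absurd ((PySem.List.sorted_eq_nil_iff _ _ _).1 hs) (by simp)
    · have hmem : ∀ y : Int, y ∈ x :: rest ↔ y ∈ x0 :: t0 := by
        intro y; rw [← hs]; exact PySem.List.mem_sorted _ _ _ _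
      have hpair : (x :: rest).Pairwise (fun a b : Int => a ≤ b) := by
        have h2 := PySem.List.sorted_pairwise (xs := x0 :: t0) (key := fun x : Int => x)
        rw [hs] at h2
        exact h2
      -- highest endpoint = running max, lowest endpoint = running min
      have hHM : rest.getLastD x = t0.foldl max x0 := by
        apply le_antisymm
        · exact le_foldl_max t0 x0 _ ((hmem _).1 (getLastD_mem rest x))
        · exact le_getLastD_of_pairwise rest x _ hpair ((hmem _).2 (foldl_max_mem t0 x0))
      have hxm : x = t0.foldl min x0 := by
        apply le_antisymm
        · have hxle : ∀ y ∈ x :: rest, x ≤ y := by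
            intro y hy
            rcases List.mem_cons.1 hy with h | h
            · omega
            · exact (List.pairwise_cons.1 hpair).1 y h
          exact hxle _ ((hmem _).2 (foldl_min_mem t0 x0))
        · exact foldl_min_le t0 x0 x ((hmem x).1 (by simp))
      have hup : ((x0 :: t0).any (fun i => decide (i > c)) = true) ↔ c < t0.foldl max x0 := by
        constructor
        · intro h
          rcases List.any_eq_true.1 h with ⟨i, hi, hic⟩
          have := le_foldl_max t0 x0 i hi
          simp at hic; omega
        · intro h
          exact List.any_eq_true.2 ⟨_, foldl_max_mem t0 x0, by simpa using h⟩
      have hdn : ((x0 :: t0).any (fun i => decide (i < c)) = true) ↔ t0.foldl min x0 < c := by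
        constructor
        · intro h
          rcases List.any_eq_true.1 h with ⟨i, hi, hic⟩
          have := foldl_min_le t0 x0 i hi
          simp at hic; omega
        · intro h
          exact List.any_eq_true.2 ⟨_, foldl_min_mem t0 x0, by simpa using h⟩
      simp only [Bool.false_or]
      by_cases hU : c < t0.foldl max x0 <;> by_cases hD : t0.foldl min x0 < c
      · -- both directions available: compare the two positive distances
        rw [hup.2 hU, hdn.2 hD]
        have hA2 := afold2 c (x0 :: t0) 0 0 le_rfl le_rfl
        simp only at hA2
        rw [hA2, foldl_shift_max, foldl_shift_min]
        have h1 : max 0 (t0.foldl max x0 - c) = t0.foldl max x0 - c := by omega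
        have h2 : min 0 (t0.foldl min x0 - c) = t0.foldl min x0 - c := by omega
        rw [h1, h2]
        simp only [hxm]
        split_ifs <;> first | rfl | omega | (simp_all <;> omega)
      · rw [hup.2 hU, (by simpa using (not_iff_not.2 hdn).2 hD : ((x0 :: t0).any (fun i => decide (i < c))) = false)]
        simp only [hxm]
        split_ifs <;> first | rfl | omega | (simp_all <;> omega)
      · rw [hdn.2 hD, (by simpa using (not_iff_not.2 hup).2 hU : ((x0 :: t0).any (fun i => decide (i > c))) = false)]
        simp only [hxm]
        split_ifs <;> first | rfl | omega | (simp_all <;> omega)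
      · rw [(by simpa using (not_iff_not.2 hup).2 hU : ((x0 :: t0).any (fun i => decide (i > c))) = false),
            (by simpa using (not_iff_not.2 hdn).2 hD : ((x0 :: t0).any (fun i => decide (i < c))) = false)]
        simp only [hxm]
        split_ifs <;> first | rfl | omega | (simp_all <;> omega)
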